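-- pv_equiv track=rewrite | github.com/sio/HomeLibraryCatalog | hlc/util.py | mangle
-- ===== SOURCE A (Python) =====
-- def mangle(text, streams=3, padding="_"):
--     """Mix characters in a string in a reversable way"""
--     if streams < 2:
--         streams = 2
--     if len(text) % streams:
--         text = padding * (streams - len(text) % streams) + text
--
--     words = [str(),] * streams
--     for pos, char in enumerate(text):
--         words[pos % streams] += char
--     return "".join(words)
-- ===== SOURCE B (Python) =====
-- def mangle(text, streams=3, padding="_"):
--     """Mix characters in a string in a reversable way"""
--     if streams < 2:
--         streams = 2
--     text = padding * (-len(text) % streams) + text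
--     out = []
--     for start in range(streams):
--         j = start
--         while j < len(text):
--             out.append(text[j])
--             j += streams
--     return "".join(out)
-- ===== Notes on version B (the rewrite author's own statement) =====
-- stated objective: alternative
-- what changed: replaces A's single pass that dispatches each character by pos % streams into per-stream buckets grown with string += by streams independent index walks (j = start; j += streams) appending into one flat output list joined once, and folds the padding if into the unconditional padding * (-len(text) % streams)
import Mathlib
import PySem

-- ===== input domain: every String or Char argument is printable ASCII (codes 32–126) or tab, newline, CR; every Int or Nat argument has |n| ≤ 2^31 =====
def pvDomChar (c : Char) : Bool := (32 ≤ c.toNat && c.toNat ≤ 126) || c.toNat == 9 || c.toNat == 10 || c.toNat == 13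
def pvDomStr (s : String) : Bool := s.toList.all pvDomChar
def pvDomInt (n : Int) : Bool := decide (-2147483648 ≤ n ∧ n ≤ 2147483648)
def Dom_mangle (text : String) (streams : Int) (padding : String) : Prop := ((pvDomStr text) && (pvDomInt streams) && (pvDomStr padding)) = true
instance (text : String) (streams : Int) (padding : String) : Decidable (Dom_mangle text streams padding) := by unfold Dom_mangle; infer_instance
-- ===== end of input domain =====

-- B replaces A's single modulo-dispatch pass into per-stream buckets by `streams` explicit
-- index walks (j = start; while j < len: take text[j]; j += streams) appending to ONE flat
-- output list, and folds the padding `if` into the unconditional `padding * (-len % streams)`.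

-- ===== PORT A =====
-- strings are carried as List Char (PySem.Chars); 'padding * k' is k concatenated copies
-- (List.replicate … .flatten, exact also for k ≤ 0 via Int.toNat); words[i] += c is
-- set i (getD i [] ++ [c]) — the index pos % streams is always in range.
def mangle (text : String) (streams : Int) (padding : String) : String :=
  let streams := if streams < 2 then 2 else streams
  let cs : List Char :=
    if PySem.Int.mod (PySem.Str.len text) streams ≠ 0 then
      (List.replicate (streams - PySem.Int.mod (PySem.Str.len text) streams).toNat
        padding.toList).flatten ++ text.toList
    else text.toList
  let words : List (List Char) := List.replicate streams.toNat []
  let words := (PySem.List.enumerate cs 0).foldl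
    (fun ws pc =>
      ws.set (PySem.Int.mod pc.1 streams).toNat
        (ws.getD (PySem.Int.mod pc.1 streams).toNat [] ++ [pc.2])) words
  String.ofList (PySem.Chars.join [] words)

-- ===== PORT B =====
-- the inner 'j = start; while j < len(text): out.append(text[j]); j += streams' loop;
-- the step streams ≥ 2 is carried as p + 1 (p = streams - 1) so termination is structural
-- in the remaining length; text[j] under the guard j < len is plain in-range indexing.
def mangleWalk (cs : List Char) (p : Nat) (j : Nat) : List Char :=
  if h : j < cs.length then cs[j] :: mangleWalk cs p (j + p + 1) else []
  termination_by cs.length - j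
  decreasing_by omega

def mangle_alt (text : String) (streams : Int) (padding : String) : String :=
  let streams := if streams < 2 then 2 else streams
  -- 'text = padding * (-len(text) % streams) + text' (no if: -len % streams is 0 exactly
  -- when len is a multiple of streams; Python '%' = PySem.Int.mod)
  let cs : List Char :=
    (List.replicate (PySem.Int.mod (-(PySem.Str.len text)) streams).toNat
      padding.toList).flatten ++ text.toList
  -- 'for start in range(streams):' run the while-loop walk, extending the flat output
  let out : List Char :=
    (PySem.List.pyRange 0 streams 1).foldl
      (fun acc start => acc ++ mangleWalk cs (streams.toNat - 1) start.toNat) []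
  String.ofList out

-- ===== PRECONDITION & SPEC =====
def Spec_mangle (text : String) (streams : Int) (padding : String) (out : String) : Prop := out = mangle_alt text streams padding
instance (text : String) (streams : Int) (padding : String) (out : String) : Decidable (Spec_mangle text streams padding out) := by unfold Spec_mangle; infer_instance

-- ===== CLAIM (what is proved, stated in full; the proofs are below) =====
def Claim_equal_mangle : Prop := ∀ (text : String) (streams : Int) (padding : String), Dom_mangle text streams padding → Spec_mangle text streams padding (mangle text streams padding)

-- ===== LEMMAS AND PROOFS =====

/-- Every `s`-th element of `l` after skipping a phase of `j` elements. -/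
def strideL (s : Nat) : List Char → Nat → List Char
  | [], _ => []
  | c :: t, 0 => c :: strideL s t (s - 1)
  | _ :: t, j + 1 => strideL s t j

lemma strideL_drop (s : Nat) : ∀ (l : List Char) (j : Nat), strideL s l j = strideL s (l.drop j) 0 := by
  intro l
  induction l with
  | nil => intro j; simp [strideL]
  | cons c t ih =>
    intro j
    match j with
    | 0 => rfl
    | j + 1 => simpa [strideL] using ih j

lemma mod_small_char (v s : Nat) (h : v < 2 * s) :
    v % s = if v < s then v else v - s := by
  split
  · exact Nat.mod_eq_of_lt ‹_›
  · rw [Nat.mod_eq_sub_mod (by omega)]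
    exact Nat.mod_eq_of_lt (by omega)

lemma phase_eq (sN r : Nat) (hs : 0 < sN) (hr : r < sN) :
    (sN + r - (r + 1) % sN) % sN = sN - 1 := by
  by_cases hc : r + 1 = sN
  · rw [hc, Nat.mod_self, Nat.sub_zero, mod_small_char (sN + r) sN (by omega)]
    split <;> omega
  · rw [Nat.mod_eq_of_lt (show r + 1 < sN by omega),
        mod_small_char (sN + r - (r + 1)) sN (by omega)]
    split <;> omega

lemma phase_zero (sN r : Nat) : (sN + r - r) % sN = 0 := by
  rw [show sN + r - r = sN by omega, Nat.mod_self]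

lemma phase_pos (sN r q : Nat) (hr : r < sN) (hq : q < sN) (hne : r ≠ q) :
    0 < (sN + q - r) % sN := by
  rw [mod_small_char (sN + q - r) sN (by omega)]
  split <;> omega

lemma phase_succ (sN r q : Nat) (hs : 0 < sN) (hr : r < sN) (hq : q < sN) (hne : r ≠ q) :
    (sN + q - (r + 1) % sN) % sN = (sN + q - r) % sN - 1 := by
  by_cases hc : r + 1 = sN
  · rw [hc, Nat.mod_self, Nat.sub_zero, mod_small_char (sN + q) sN (by omega),
        mod_small_char (sN + q - r) sN (by omega)]
    split <;> split <;> omega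
  · rw [Nat.mod_eq_of_lt (show r + 1 < sN by omega),
        mod_small_char (sN + q - (r + 1)) sN (by omega),
        mod_small_char (sN + q - r) sN (by omega)]
    split <;> split <;> omega

lemma zipWith_append_replicate_nil (ws : List (List Char)) :
    List.zipWith (· ++ ·) ws (List.replicate ws.length ([] : List Char)) = ws := by
  induction ws with
  | nil => rfl
  | cons w t ih => simp [List.replicate_succ, ih]

lemma zipWith_replicate_nil_append (n : Nat) (l : List (List Char)) (h : l.length = n) :
    List.zipWith (· ++ ·) (List.replicate n ([] : List Char)) l = l := by
  subst h
  induction l with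
  | nil => rfl
  | cons w t ih => simp [List.replicate_succ, ih]

/-- A's dispatch loop, started at any position `p`, appends to bucket `i` exactly the
stride of `cs` with phase `(s + i - p % s) % s`. -/
lemma loop_inv (sN : Nat) (hs : 0 < sN) :
    ∀ (cs : List Char) (pN : Nat) (ws : List (List Char)), ws.length = sN →
    (PySem.List.enumerate cs (pN : Int)).foldl
      (fun ws pc =>
        ws.set (PySem.Int.mod pc.1 (sN : Int)).toNat
          (ws.getD (PySem.Int.mod pc.1 (sN : Int)).toNat [] ++ [pc.2])) ws
    = List.zipWith (· ++ ·) ws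
        ((List.range sN).map (fun i => strideL sN cs ((sN + i - pN % sN) % sN))) := by
  intro cs
  induction cs with
  | nil =>
    intro pN ws hlen
    simp only [PySem.List.enumerate_nil, List.foldl_nil]
    have : ((List.range sN).map (fun i => strideL sN ([] : List Char) ((sN + i - pN % sN) % sN)))
        = List.replicate sN ([] : List Char) := by
      simp [strideL, List.map_const']
    rw [this, ← hlen, zipWith_append_replicate_nil]
  | cons c t ih =>
    intro pN ws hlen
    have hcast : ((pN : Int) + 1) = ((pN + 1 : Nat) : Int) := by push_cast; ring
    have hmod : (PySem.Int.mod (pN : Int) (sN : Int)).toNat = pN % sN := by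
      rw [PySem.Int.mod_natCast]; exact Int.toNat_natCast _
    rw [PySem.List.enumerate_cons]
    simp only [List.foldl_cons]
    rw [hmod, hcast, ih (pN + 1) _ (by simp [hlen])]
    have hsucc : (pN + 1) % sN = (pN % sN + 1) % sN := (Nat.mod_add_mod pN sN 1).symm
    rw [hsucc]
    have hrlt : pN % sN < sN := Nat.mod_lt _ hs
    generalize hgen : pN % sN = r at hrlt ⊢
    apply List.ext_getElem
    · simp [hlen]
    · intro q h1 h2
      have hq : q < sN := by
        simp only [List.length_zipWith, List.length_map, List.length_range,
          List.length_set, hlen] at h1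
        omega
      rw [List.getElem_zipWith, List.getElem_zipWith]
      simp only [List.getElem_map, List.getElem_range, List.getElem_set]
      by_cases hqr : r = q
      · subst hqr
        rw [if_pos rfl, phase_eq sN r hs hrlt, phase_zero sN r,
            List.getD_eq_getElem ws [] (show r < ws.length by omega)]
        simp only [strideL]
        simp
      · rw [if_neg hqr, phase_succ sN r q hs hrlt hq hqr]
        congr 1
        obtain ⟨m, hm⟩ : ∃ m, (sN + q - r) % sN = m + 1 :=
          ⟨(sN + q - r) % sN - 1, by have := phase_pos sN r q hrlt hq hqr; omega⟩
        rw [hm]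
        simp only [strideL, Nat.add_sub_cancel]

/-- A's loop from position 0 on `sN` empty buckets yields exactly the strides of phase 0..sN-1. -/
lemma keyA (cs : List Char) (sN : Nat) (hs : 0 < sN) :
    (PySem.List.enumerate cs 0).foldl
      (fun ws pc =>
        ws.set (PySem.Int.mod pc.1 (sN : Int)).toNat
          (ws.getD (PySem.Int.mod pc.1 (sN : Int)).toNat [] ++ [pc.2]))
      (List.replicate sN [])
    = (List.range sN).map (fun i => strideL sN cs i) := by
  have h0 : ((0 : Nat) : Int) = 0 := rfl
  conv_lhs => rw [← h0]
  rw [loop_inv sN hs cs 0 _ (by simp)]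
  have hbuck : ((List.range sN).map (fun i => strideL sN cs ((sN + i - 0 % sN) % sN)))
      = (List.range sN).map (fun i => strideL sN cs i) := by
    apply List.map_congr_left
    intro i hi
    have hi' : i < sN := List.mem_range.mp hi
    rw [Nat.zero_mod, Nat.sub_zero, Nat.add_comm, Nat.add_mod_right,
        Nat.mod_eq_of_lt hi']
  rw [hbuck, zipWith_replicate_nil_append sN _ (by simp)]

lemma join_empty_sep (ws : List (List Char)) : PySem.Chars.join [] ws = ws.flatten := by
  induction ws with
  | nil => rfl
  | cons w t ih =>
    cases t with
    | nil => simp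
    | cons w2 t2 => rw [PySem.Chars.join_cons_cons, ih]; simp

/-- B's index walk with step `p + 1` is the stride with phase `j`. -/
lemma walk_eq_stride (cs : List Char) (p : Nat) (j : Nat) :
    mangleWalk cs p j = strideL (p + 1) cs j := by
  rw [mangleWalk]
  by_cases h : j < cs.length
  · rw [dif_pos h, walk_eq_stride cs p (j + p + 1)]
    rw [strideL_drop _ cs j, List.drop_eq_getElem_cons h]
    simp only [strideL, Nat.add_sub_cancel]
    rw [strideL_drop _ cs (j + p + 1), strideL_drop _ (cs.drop (j + 1)) p,
        List.drop_drop, show j + 1 + p = j + p + 1 from by omega]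
  · rw [dif_neg h, strideL_drop, List.drop_eq_nil_of_le (by omega)]
    rfl
  termination_by cs.length - j
  decreasing_by omega

/-- B's outer loop concatenates the walks of phases 0..sN-1. -/
lemma keyB (cs : List Char) (sN : Nat) (hs : 0 < sN) :
    (PySem.List.pyRange 0 (sN : Int) 1).foldl
      (fun acc start => acc ++ mangleWalk cs (sN - 1) start.toNat) []
    = ((List.range sN).map (fun i => strideL sN cs i)).flatten := by
  rw [PySem.List.foldl_append_eq_flatMap, List.nil_append,
      PySem.List.pyRange_zero_natCast, List.flatMap_map]
  rw [List.flatMap_def]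
  congr 1
  apply List.map_congr_left
  intro i _
  simp only [Int.toNat_natCast]
  rw [walk_eq_stride]
  congr 1
  omega

/-- `-L % s` (Python mod, s > 0) is A's conditional pad count. -/
lemma neg_mod_pad (L : Int) (s : Int) (hs : 0 < s) :
    PySem.Int.mod (-L) s
      = if PySem.Int.mod L s ≠ 0 then s - PySem.Int.mod L s else 0 := by
  rw [PySem.Int.mod_eq_emod_of_pos hs, PySem.Int.mod_eq_emod_of_pos hs]
  rw [Int.neg_emod]
  by_cases hz : s ∣ L
  · simp [hz, Int.emod_eq_zero_of_dvd hz]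
  · have hz' : L % s ≠ 0 := fun h => hz (Int.dvd_of_emod_eq_zero h)
    rw [if_neg hz, if_pos hz', Int.natAbs_of_nonneg (le_of_lt hs)]

-- ===== VERDICT (by name: the statement is the Claim_ definition above) =====
theorem mangle_spec : Claim_equal_mangle := by
  unfold Claim_equal_mangle Spec_mangle
  intro text streams padding _
  simp only [mangle, mangle_alt]
  have hs : 0 < (if streams < 2 then 2 else streams) := by split <;> omega
  obtain ⟨sN, hsN⟩ : ∃ n : Nat, (if streams < 2 then 2 else streams) = (n : Int) :=
    ⟨_, (Int.toNat_of_nonneg (by omega)).symm⟩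
  rw [hsN] at hs ⊢
  have hsn : 0 < sN := by exact_mod_cast hs
  -- the two padded texts coincide
  have hcs :
      (List.replicate (PySem.Int.mod (-(PySem.Str.len text)) (sN : Int)).toNat
        padding.toList).flatten ++ text.toList
      = if PySem.Int.mod (PySem.Str.len text) (sN : Int) ≠ 0 then
          (List.replicate ((sN : Int) - PySem.Int.mod (PySem.Str.len text) (sN : Int)).toNat
            padding.toList).flatten ++ text.toList
        else text.toList := by
    rw [neg_mod_pad _ _ hs]
    split <;> simp_all
  rw [hcs]
  rw [Int.toNat_natCast]
  rw [keyA _ sN hsn, join_empty_sep, keyB _ sN hsn]
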